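-- pv_equiv track=rewrite | github.com/AMIVAYUN/codeTestPrac | Programmers/Python/최고의 집합.py | solution
-- ===== SOURCE A (Python) =====
-- def solution(n, s):
--     answer = [];
--
--     if( s < n ):
--         return [-1];
--
--     stand = s // n ;
--
--     sum_ = stand * n;
--
--     diff = s- sum_
--
--     answer = [ stand ] * n;
--
--     idx = 0;
--
--     while diff > 0:
--         answer[ idx ] += 1;
--         diff -= 1;
--         idx += 1;
--
--     return sorted( answer )
-- ===== SOURCE B (Python) =====
-- def solution(n, s):
--     if s < n:
--         return [-1]
--     q, r = s // n, s % n
--     return [q] * (n - r) + [q + 1] * r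
-- ===== Notes on version B (the rewrite author's own statement) =====
-- stated objective: simpler
-- what changed: B builds the answer in ascending order directly from divmod as [q]*(n-r)+[q+1]*r, removing A's remainder-distribution while-loop and the final sorted() call.
import Mathlib
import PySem

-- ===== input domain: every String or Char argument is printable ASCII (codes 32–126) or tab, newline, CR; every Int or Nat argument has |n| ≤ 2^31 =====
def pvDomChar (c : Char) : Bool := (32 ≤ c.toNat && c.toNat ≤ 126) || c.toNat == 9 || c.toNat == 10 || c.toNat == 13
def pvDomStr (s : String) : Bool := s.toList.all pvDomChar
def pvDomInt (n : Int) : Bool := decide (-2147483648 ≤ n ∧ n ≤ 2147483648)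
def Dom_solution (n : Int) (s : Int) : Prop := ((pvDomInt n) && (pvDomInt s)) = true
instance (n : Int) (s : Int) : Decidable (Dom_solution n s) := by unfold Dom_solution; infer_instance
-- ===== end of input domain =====

-- B replaces A's remainder-distribution while-loop and final sorted() by the direct
-- ascending construction [q]*(n-r)+[q+1]*r from divmod (simpler; same return values).

-- ===== PORT A =====
-- the while loop: answer[idx] += 1; diff -= 1; idx += 1 while diff > 0
def solutionLoop (answer : List Int) (diff : Int) (idx : Int) : List Int :=
  if h : diff > 0 then
    solutionLoop (answer.set idx.toNat (answer.getD idx.toNat 0 + 1)) (diff - 1) (idx + 1)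
  else answer
termination_by diff.toNat
decreasing_by omega

def solution (n : Int) (s : Int) : List Int :=
  if s < n then [-1]
  else
    let stand := PySem.Int.floordiv s n
    let sum_ := stand * n
    let diff := s - sum_
    let answer := List.replicate n.toNat stand
    PySem.List.sorted (solutionLoop answer diff 0) (fun x => x) false

-- ===== PORT B =====
def solution_alt (n : Int) (s : Int) : List Int :=
  if s < n then [-1]
  else
    let q := PySem.Int.floordiv s n
    let r := PySem.Int.mod s n
    List.replicate (n - r).toNat q ++ List.replicate r.toNat (q + 1)

-- ===== PRECONDITION & SPEC =====
-- Pre_ excludes exactly n = 0 with 0 ≤ s, where A (and B) raise ZeroDivisionError.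
def Pre_solution (n : Int) (s : Int) : Prop := n ≠ 0 ∨ s < 0
instance (n : Int) (s : Int) : Decidable (Pre_solution n s) := by unfold Pre_solution; infer_instance
def pvWitness_solution : Int × Int := (3, 11)

def Spec_solution (n : Int) (s : Int) (out : List Int) : Prop := out = solution_alt n s
instance (n : Int) (s : Int) (out : List Int) : Decidable (Spec_solution n s out) := by unfold Spec_solution; infer_instance

-- ===== CLAIM (what is proved, stated in full; the proofs are below) =====
def Claim_equal_solution : Prop := ∀ (n : Int) (s : Int), Dom_solution n s → Pre_solution n s → Spec_solution n s (solution n s)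

-- ===== LEMMAS AND PROOFS =====

-- the loop turns the first d copies of q (after a prefix it never touches) into q+1
lemma solutionLoop_eq (d : Nat) (pre : List Int) (q : Int) (m : Nat) (hd : d ≤ m) :
    solutionLoop (pre ++ List.replicate m q) (d : Int) (pre.length : Int) =
      pre ++ (List.replicate d (q + 1) ++ List.replicate (m - d) q) := by
  induction d generalizing pre m with
  | zero => rw [solutionLoop]; simp
  | succ d ih =>
      obtain ⟨m', rfl⟩ : ∃ m', m = m' + 1 := ⟨m - 1, by omega⟩
      rw [solutionLoop]
      simp only [show ((d + 1 : Nat) : Int) > 0 from by exact_mod_cast Nat.succ_pos d, dite_true,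
        Int.toNat_natCast]
      have hget : (pre ++ List.replicate (m' + 1) q).getD pre.length 0 = q := by
        simp [List.getD]
      have hset : (pre ++ List.replicate (m' + 1) q).set pre.length (q + 1) =
          (pre ++ [q + 1]) ++ List.replicate m' q := by
        rw [List.set_append_right _ _ (le_refl pre.length)]
        simp [List.replicate_succ]
      rw [hget, hset]
      have h1 : ((d + 1 : Nat) : Int) - 1 = (d : Int) := by push_cast; ring
      have h2 : (pre.length : Int) + 1 = ((pre ++ [q + 1]).length : Int) := by simp
      rw [h1, h2, ih (pre ++ [q + 1]) m' (by omega)]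
      simp [List.replicate_succ, List.append_assoc]

lemma sorted_rep_rep (a b : Nat) (q : Int) :
    PySem.List.sorted (List.replicate a (q + 1) ++ List.replicate b q) (fun x => x) false =
      List.replicate b q ++ List.replicate a (q + 1) := by
  apply PySem.List.sorted_id_eq_of_perm_of_pairwise
  · exact List.perm_append_comm
  · rw [List.pairwise_append]
    refine ⟨List.pairwise_replicate.mpr (Or.inr (le_refl q)),
      List.pairwise_replicate.mpr (Or.inr (le_refl (q + 1))), ?_⟩
    intro x hx y hy
    rw [List.eq_of_mem_replicate hx, List.eq_of_mem_replicate hy]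
    omega

-- ===== VERDICT (by name: the statement is the Claim_ definition above) =====
theorem solution_spec : Claim_equal_solution := by
  intro n s _ hpre
  unfold Spec_solution solution solution_alt
  by_cases hs : s < n
  · simp [hs]
  · simp only [hs, if_false]
    have hn : n ≠ 0 := by
      rcases hpre with h | h
      · exact h
      · intro h0; omega
    set q := PySem.Int.floordiv s n with hq
    set r := PySem.Int.mod s n with hr
    have hdm : q * n + r = s := PySem.Int.floordiv_mul_add_mod s n
    have hdiff : s - q * n = r := by omega
    rw [hdiff]
    rcases lt_or_gt_of_ne hn with hneg | hpos
    · -- n < 0 : the answer list is empty and diff = r ≤ 0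
      have hb := PySem.Int.mod_neg_bounds s hneg
      have h1 : n.toNat = 0 := by omega
      have h2 : (n - r).toNat = 0 := by omega
      have h3 : r.toNat = 0 := by omega
      rw [solutionLoop, h1, h2, h3]
      simp [show ¬ r > 0 from by omega, PySem.List.sorted]
    · -- n > 0 : 0 ≤ r < n
      have hr0 : 0 ≤ r := PySem.Int.mod_nonneg s hpos
      have hrn : r < n := PySem.Int.mod_lt s hpos
      have hcast : r = (r.toNat : Int) := (Int.toNat_of_nonneg hr0).symm
      have hloop := solutionLoop_eq r.toNat ([]) q n.toNat (by omega)
      simp only [List.nil_append, List.length_nil, Nat.cast_zero] at hloop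
      rw [hcast, hloop, sorted_rep_rep]
      congr 1
      congr 1
      omega
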